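-- pv_equiv track=rewrite | github.com/dylankainth/DARN | core/probe.py | select_probe_model
-- ===== SOURCE A (Python) =====
-- from typing import Dict, List, Mapping, MutableMapping, Sequence
--
-- PROBE_PREFERENCE: List[str] = ["llama3", "phi", "mistral", "qwen"]
--
-- def select_probe_model(models: Sequence[str]) -> str | None:
-- 	"""Choose a model using preference list, else smallest name."""
--
-- 	normalized = [m.strip() for m in models if m]
-- 	if not normalized:
-- 		return None
--
-- 	lower_map = {m.lower(): m for m in normalized}
-- 	for preferred in PROBE_PREFERENCE:
-- 		if preferred in lower_map:
-- 			return lower_map[preferred]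
--
-- 	# Fallback: pick by shortest name, then lexicographic for stability
-- 	return sorted(normalized, key=lambda m: (len(m), m))[0]
-- ===== SOURCE B (Python) =====
-- PROBE_PREFERENCE = ["llama3", "phi", "mistral", "qwen"]
--
-- def select_probe_model(models):
--     """Single pass: track the best preferred model (smallest rank, later
--     occurrence wins on equal rank) and the (len, name)-smallest fallback."""
--     rank = {p: i for i, p in enumerate(PROBE_PREFERENCE)}
--     best_rank = None
--     best_pref = None
--     best_fall = None
--     for raw in models:
--         if not raw:
--             continue
--         m = raw.strip()
--         r = rank.get(m.lower())
--         if r is not None and (best_rank is None or r <= best_rank):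
--             best_rank = r
--             best_pref = m
--         if best_fall is None or (len(m), m) < (len(best_fall), best_fall):
--             best_fall = m
--     return best_pref if best_pref is not None else best_fall
-- ===== Notes on version B (the rewrite author's own statement) =====
-- stated objective: alternative
-- what changed: Replaced A's three phases (build a lowercase dict, scan the preference list with lookups, then sort for the fallback) by one fused pass over the models that simultaneously tracks the best-ranked preferred model (later occurrence wins on equal rank, like dict overwrite) and the (len, name)-minimal fallback (first minimum, like the stable sort's head).
import Mathlib
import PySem

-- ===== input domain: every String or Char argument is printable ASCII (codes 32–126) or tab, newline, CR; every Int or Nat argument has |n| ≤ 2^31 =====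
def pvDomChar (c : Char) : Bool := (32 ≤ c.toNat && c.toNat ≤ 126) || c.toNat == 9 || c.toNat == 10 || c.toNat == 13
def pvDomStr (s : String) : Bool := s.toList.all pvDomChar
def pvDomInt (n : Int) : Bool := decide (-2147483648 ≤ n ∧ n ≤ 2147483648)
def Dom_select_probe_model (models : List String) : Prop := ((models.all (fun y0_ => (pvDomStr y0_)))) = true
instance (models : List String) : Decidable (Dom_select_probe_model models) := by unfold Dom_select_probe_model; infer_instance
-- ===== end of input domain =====

-- B fuses A's build-map / preference-scan / sort phases into a single pass over the models
-- (objective: alternative decomposition, same result; no speed claim).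

-- ===== PORT A =====
def PROBE_PREFERENCE : List String := ["llama3", "phi", "mistral", "qwen"]

-- 'for preferred in PROBE_PREFERENCE: if preferred in lower_map: return lower_map[preferred]'
-- ('preferred in lower_map' + the lookup is one get? match)
def prefLookup (lower_map : PySem.Dict String String) : List String → Option String
  | [] => none
  | p :: rest =>
    match lower_map.get? p with
    | some m => some m
    | none => prefLookup lower_map rest

def select_probe_model (models : List String) : Option String :=
  let normalized := (models.filter (fun m => !(m == ""))).map PySem.Str.strip
  if normalized = [] then none
  else
    let lower_map := normalized.foldl (fun d m => d.insert (PySem.Str.lower m) m)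
      (PySem.Dict.empty : PySem.Dict String String)
    match prefLookup lower_map PROBE_PREFERENCE with
    | some m => some m
    | none =>
      (PySem.List.sorted2 normalized (fun m => PySem.Str.len m) (fun m => m)).head?

-- ===== PORT B =====
-- rank = {p: i for i, p in enumerate(PROBE_PREFERENCE)}
def pvRank : PySem.Dict String Int :=
  (PySem.List.enumerate PROBE_PREFERENCE).foldl (fun d p => d.insert p.2 p.1)
    (PySem.Dict.empty : PySem.Dict String Int)

-- the preferred-model half of B's loop body
def stepPref (rank : PySem.Dict String Int) (st : Option Int × Option String) (m : String) :
    Option Int × Option String :=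
  match rank.get? (PySem.Str.lower m) with
  | none => st
  | some r =>
    match st.1 with
    | none => (some r, some m)
    | some b => if r ≤ b then (some r, some m) else st

-- the fallback half of B's loop body: (len(m), m) < (len(f), f)
def stepFall (bf : Option String) (m : String) : Option String :=
  match bf with
  | none => some m
  | some f =>
    if PySem.Str.len m < PySem.Str.len f ∨ (PySem.Str.len m = PySem.Str.len f ∧ m < f)
    then some m else bf

def select_probe_model_alt (models : List String) : Option String :=
  let rank := pvRank
  let st := models.foldl
    (fun (st : (Option Int × Option String) × Option String) raw =>
      if raw == "" then st
      else (stepPref rank st.1 (PySem.Str.strip raw), stepFall st.2 (PySem.Str.strip raw)))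
    ((none, none), none)
  match st.1.2 with
  | some p => some p
  | none => st.2

-- ===== PRECONDITION & SPEC =====
def Spec_select_probe_model (models : List String) (out : Option String) : Prop := out = select_probe_model_alt models
instance (models : List String) (out : Option String) : Decidable (Spec_select_probe_model models out) := by unfold Spec_select_probe_model; infer_instance

-- ===== CLAIM (what is proved, stated in full; the proofs are below) =====
def Claim_equal_select_probe_model : Prop := ∀ (models : List String), Dom_select_probe_model models → Spec_select_probe_model models (select_probe_model models)

-- ===== LEMMAS AND PROOFS =====

-- the normalized list both programs effectively traverse
def pvNs (models : List String) : List String :=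
  (models.filter (fun m => !(m == ""))).map PySem.Str.strip

-- last model (in list order) whose lowercase equals k = what the dict lookup returns
def lastMap (ns : List String) (k : String) : Option String :=
  ns.reverse.find? (fun m => PySem.Str.lower m == k)

def valA (ns : List String) : Option String :=
  match lastMap ns "llama3" with
  | some m => some m
  | none => match lastMap ns "phi" with
    | some m => some m
    | none => match lastMap ns "mistral" with
      | some m => some m
      | none => match lastMap ns "qwen" with
        | some m => some m
        | none => none

def idxA (ns : List String) : Option Int :=
  match lastMap ns "llama3" with
  | some _ => some 0
  | none => match lastMap ns "phi" with
    | some _ => some 1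
    | none => match lastMap ns "mistral" with
      | some _ => some 2
      | none => match lastMap ns "qwen" with
        | some _ => some 3
        | none => none

theorem foldl_skip_empty (models : List String)
    (init : (Option Int × Option String) × Option String) :
    models.foldl (fun st raw => if raw == "" then st
        else (stepPref pvRank st.1 (PySem.Str.strip raw), stepFall st.2 (PySem.Str.strip raw))) init
      = (pvNs models).foldl (fun st m => (stepPref pvRank st.1 m, stepFall st.2 m)) init := by
  induction models generalizing init with
  | nil => rfl
  | cons m rest ih =>
    by_cases h : m = "" <;> simp [pvNs, h, List.foldl_cons] at * <;> simp [ih]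

theorem foldl_pair_split (rank : PySem.Dict String Int) (ns : List String)
    (p : Option Int × Option String) (f : Option String) :
    ns.foldl (fun (st : (Option Int × Option String) × Option String) m =>
        (stepPref rank st.1 m, stepFall st.2 m)) (p, f)
      = (ns.foldl (stepPref rank) p, ns.foldl stepFall f) := by
  induction ns generalizing p f with
  | nil => rfl
  | cons m rest ih => simp [List.foldl_cons, ih]

theorem get?_foldl_insert_lower (ns : List String) (d : PySem.Dict String String) (k : String) :
    (ns.foldl (fun d m => d.insert (PySem.Str.lower m) m) d).get? k
      = match lastMap ns k with
        | some m => some m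
        | none => d.get? k := by
  induction ns generalizing d with
  | nil => simp [lastMap]
  | cons m rest ih =>
    rw [List.foldl_cons, ih]
    have hrev : (m :: rest).reverse = rest.reverse ++ [m] := by simp
    simp only [lastMap, hrev, List.find?_append]
    cases hf : rest.reverse.find? (fun x => PySem.Str.lower x == k) with
    | some x => simp [hf]
    | none =>
      by_cases hk : PySem.Str.lower m = k
      · simp [hf, hk, PySem.Dict.get?_insert_self]
      · simp [hf, hk, PySem.Dict.get?_insert_of_ne _ _ (fun h => hk h.symm)]

theorem pvRank_get (s : String) :
    pvRank.get? s =
      if s = "llama3" then some 0 else if s = "phi" then some 1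
      else if s = "mistral" then some 2 else if s = "qwen" then some 3 else none := by
  have h : pvRank = PySem.Dict.mk [("llama3", 0), ("phi", 1), ("mistral", 2), ("qwen", 3)] := by
    rfl
  rw [h]
  by_cases h0 : s = "llama3"
  · subst h0; decide
  by_cases h1 : s = "phi"
  · subst h1; decide
  by_cases h2 : s = "mistral"
  · subst h2; decide
  by_cases h3 : s = "qwen"
  · subst h3; decide
  have e0 : ("llama3" == s) = false := by simp [Ne.symm h0]
  have e1 : ("phi" == s) = false := by simp [Ne.symm h1]
  have e2 : ("mistral" == s) = false := by simp [Ne.symm h2]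
  have e3 : ("qwen" == s) = false := by simp [Ne.symm h3]
  simp [PySem.Dict.get?_mk_cons, PySem.Dict.get?, e0, e1, e2, e3, h0, h1, h2, h3]

theorem prefFold (ns : List String) :
    ns.foldl (stepPref pvRank) (none, none) = (idxA ns, valA ns) := by
  induction ns using List.reverseRecOn with
  | nil => rfl
  | append_singleton ns m ih =>
    rw [List.foldl_append, List.foldl_cons, List.foldl_nil, ih]
    have hlm : ∀ k, lastMap (ns ++ [m]) k =
        (if PySem.Str.lower m = k then some m else lastMap ns k) := by
      intro k
      simp only [lastMap, List.reverse_append, List.reverse_singleton, List.singleton_append,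
        List.find?_cons]
      by_cases h : PySem.Str.lower m = k
      · simp [h]
      · have hb : (PySem.Str.lower m == k) = false := by simp [h]
        simp [hb, h]
    simp only [stepPref, pvRank_get, idxA, valA, hlm]
    by_cases h0 : PySem.Str.lower m = "llama3" <;>
    by_cases h1 : PySem.Str.lower m = "phi" <;>
    by_cases h2 : PySem.Str.lower m = "mistral" <;>
    by_cases h3 : PySem.Str.lower m = "qwen" <;>
    simp_all <;>
    cases hA : lastMap ns "llama3" <;>
    cases hB : lastMap ns "phi" <;>
    cases hC : lastMap ns "mistral" <;>
    cases hD : lastMap ns "qwen" <;>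
    simp_all

theorem head?_insertBy {α : Type} (before : α → α → Bool) (x : α) (acc : List α) :
    (PySem.List.insertBy before x acc).head? =
      some (match acc with | [] => x | y :: _ => if before x y then x else y) := by
  cases acc with
  | nil => simp [PySem.List.insertBy]
  | cons y ys =>
    by_cases h : before x y <;> simp [PySem.List.insertBy, h]

theorem head?_foldl_insertBy {α : Type} (before : α → α → Bool) (ns : List α) (acc : List α) :
    ((ns.foldl (fun a x => PySem.List.insertBy before x a) acc).head?)
      = ns.foldl (fun o x =>
          match o with
          | none => some x
          | some y => if before x y then some x else some y) acc.head? := by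
  induction ns generalizing acc with
  | nil => rfl
  | cons m rest ih =>
    rw [List.foldl_cons, List.foldl_cons, ih, head?_insertBy]
    cases acc with
    | nil => rfl
    | cons y ys => by_cases h : before m y <;> simp [h]

theorem fallFold (ns : List String) :
    (PySem.List.sorted2 ns (fun m => PySem.Str.len m) (fun m => m)).head?
      = ns.foldl stepFall none := by
  have hdef : PySem.List.sorted2 ns (fun m => PySem.Str.len m) (fun m => m)
      = ns.foldl (fun acc x => PySem.List.insertBy
          (fun a b => decide (PySem.Str.len a < PySem.Str.len b) ||
            (!decide (PySem.Str.len b < PySem.Str.len a) && decide (a < b))) x acc) [] := rfl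
  rw [hdef, head?_foldl_insertBy]
  have h1 : ∀ (o : Option String) (x : String),
      (match o with
       | none => some x
       | some y => if (decide (PySem.Str.len x < PySem.Str.len y) ||
           (!decide (PySem.Str.len y < PySem.Str.len x) && decide (x < y))) then some x else some y)
      = stepFall o x := by
    intro o x
    cases o with
    | none => rfl
    | some y =>
      simp only [stepFall]
      set a := PySem.Str.len x with ha
      set b := PySem.Str.len y with hb
      rcases lt_trichotomy a b with h | h | h
      · have hn : ¬ b < a := by omega
        simp [h, hn]
      · have hn1 : ¬ a < b := by omega
        have hn2 : ¬ b < a := by omega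
        by_cases h3 : x < y <;> simp [h, hn1, h3]
      · have hn1 : ¬ a < b := by omega
        have hn2 : a ≠ b := by omega
        simp [h, hn1, hn2]
  have key : ∀ (f g : Option String → String → Option String),
      (∀ o x, f o x = g o x) → ∀ (l : List String) (o : Option String),
      l.foldl f o = l.foldl g o := by
    intro f g hfg l
    induction l with
    | nil => intro o; rfl
    | cons m rest ih => intro o; rw [List.foldl_cons, List.foldl_cons, hfg, ih]
  refine key _ stepFall ?_ ns none
  intro o x
  cases o with
  | none => rfl
  | some y => exact h1 (some y) x

theorem prefLookup_eq (d : PySem.Dict String String) :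
    prefLookup d PROBE_PREFERENCE =
      match d.get? "llama3" with
      | some m => some m
      | none => match d.get? "phi" with
        | some m => some m
        | none => match d.get? "mistral" with
          | some m => some m
          | none => match d.get? "qwen" with
            | some m => some m
            | none => none := by
  simp only [PROBE_PREFERENCE, prefLookup]

-- ===== VERDICT (by name: the statement is the Claim_ definition above) =====
theorem select_probe_model_spec : Claim_equal_select_probe_model := by
  intro models _
  show select_probe_model models = select_probe_model_alt models
  simp only [select_probe_model, select_probe_model_alt]
  rw [foldl_skip_empty models ((none, none), none)]
  rw [foldl_pair_split, prefFold]
  have hN : List.map PySem.Str.strip (List.filter (fun m => !m == "") models) = pvNs models := rfl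
  rw [hN]
  generalize pvNs models = ns
  by_cases hempty : ns = []
  · subst hempty
    simp [valA, lastMap]
  · rw [if_neg hempty, prefLookup_eq]
    have hA : ∀ k, ((ns.foldl (fun d m => d.insert (PySem.Str.lower m) m)
        (PySem.Dict.empty : PySem.Dict String String)).get? k) = lastMap ns k := by
      intro k
      rw [get?_foldl_insert_lower]
      cases lastMap ns k <;> rfl
    simp only [hA]
    rw [fallFold]
    show (match valA ns with
          | some m => some m
          | none => ns.foldl stepFall none) = _
    cases hv : valA ns <;> simp
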